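-- pv_equiv track=rewrite | github.com/4sunny/RiskProblem | Risk (2).py | getTotalOccurences
-- ===== SOURCE A (Python) =====
-- def getTotalOccurences(diceCount, n):
-- 	if diceCount == 1:
-- 		return 1
-- 	else:
-- 		power = diceCount - 1
-- 		f = 0
-- 		total = 0
-- 		while f < diceCount:
-- 			total += n**(power) * (n-1)**f
-- 			f += 1
-- 			power -= 1
-- 		return total
-- ===== SOURCE B (Python) =====
-- def getTotalOccurences(diceCount, n):
--     # Telescoping closed form of the geometric sum; empty sum for nonpositive counts.
--     if diceCount <= 0:
--         return 0
--     return n**diceCount - (n-1)**diceCount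
-- ===== Notes on version B (the rewrite author's own statement) =====
-- stated objective: faster
-- what changed: Replaced the O(diceCount) loop of exponentiations by the telescoping closed form n**diceCount - (n-1)**diceCount.
import Mathlib
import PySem

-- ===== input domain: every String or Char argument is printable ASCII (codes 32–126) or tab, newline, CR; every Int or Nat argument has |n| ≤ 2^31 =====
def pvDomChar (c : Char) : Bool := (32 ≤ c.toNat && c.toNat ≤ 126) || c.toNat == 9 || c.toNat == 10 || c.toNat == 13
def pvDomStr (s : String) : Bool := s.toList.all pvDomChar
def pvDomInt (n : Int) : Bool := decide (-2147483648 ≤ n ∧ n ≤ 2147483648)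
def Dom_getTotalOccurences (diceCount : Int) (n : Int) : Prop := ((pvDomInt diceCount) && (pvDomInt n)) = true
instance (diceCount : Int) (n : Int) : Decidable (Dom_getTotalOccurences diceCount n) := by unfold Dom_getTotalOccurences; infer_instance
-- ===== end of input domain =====

-- B replaces A's O(diceCount) loop of exponentiations by the telescoping closed form n^d - (n-1)^d (faster).


-- ===== PORT A =====
-- the while loop; n**power with power ≥ 0 whenever the loop body runs, so ^ power.toNat is exact
def getTotalOccurencesLoop (diceCount n : Int) (f power total : Int) : Int :=
  if _h : f < diceCount then
    getTotalOccurencesLoop diceCount n (f + 1) (power - 1)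
      (total + n ^ power.toNat * (n - 1) ^ f.toNat)
  else total
termination_by (diceCount - f).toNat
decreasing_by omega

def getTotalOccurences (diceCount : Int) (n : Int) : Int :=
  if diceCount == 1 then 1
  else getTotalOccurencesLoop diceCount n 0 (diceCount - 1) 0

-- ===== PORT B =====
def getTotalOccurences_alt (diceCount : Int) (n : Int) : Int :=
  if diceCount ≤ 0 then 0
  else n ^ diceCount.toNat - (n - 1) ^ diceCount.toNat

-- ===== PRECONDITION & SPEC =====
def Spec_getTotalOccurences (diceCount : Int) (n : Int) (out : Int) : Prop := out = getTotalOccurences_alt diceCount n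
instance (diceCount : Int) (n : Int) (out : Int) : Decidable (Spec_getTotalOccurences diceCount n out) := by unfold Spec_getTotalOccurences; infer_instance

-- ===== CLAIM (what is proved, stated in full; the proofs are below) =====
def Claim_equal_getTotalOccurences : Prop := ∀ (diceCount : Int) (n : Int), Dom_getTotalOccurences diceCount n → Spec_getTotalOccurences diceCount n (getTotalOccurences diceCount n)

-- ===== LEMMAS AND PROOFS =====

-- loop invariant: with power = d-1-f, the remaining sum telescopes
theorem getTotalOccurencesLoop_inv (d n : Int) (r : Nat) :
    ∀ f t : Int, 0 ≤ f → f ≤ d → (d - f).toNat = r →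
    getTotalOccurencesLoop d n f (d - 1 - f) t =
      t + (n - 1) ^ f.toNat * (n ^ (d - f).toNat - (n - 1) ^ (d - f).toNat) := by
  induction r with
  | zero =>
    intro f t hf hfd hr
    have hfd' : f = d := by omega
    rw [getTotalOccurencesLoop]
    simp [hfd']
  | succ r ih =>
    intro f t hf hfd hr
    have hlt : f < d := by omega
    rw [getTotalOccurencesLoop]
    rw [dif_pos hlt]
    have e1 : d - 1 - f - 1 = d - 1 - (f + 1) := by ring
    rw [e1, ih (f + 1) _ (by omega) (by omega) (by omega)]
    have ha : (d - 1 - f).toNat = r := by omega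
    have hb : (d - f).toNat = r + 1 := by omega
    have hc : (d - (f + 1)).toNat = r := by omega
    have hd' : (f + 1).toNat = f.toNat + 1 := by omega
    rw [ha, hb, hc, hd']
    ring

theorem getTotalOccurences_eq (d n : Int) :
    getTotalOccurences d n = getTotalOccurences_alt d n := by
  unfold getTotalOccurences getTotalOccurences_alt
  by_cases h1 : d = 1
  · subst h1
    norm_num
  · rw [if_neg (by simpa using h1)]
    by_cases h0 : d ≤ 0
    · rw [getTotalOccurencesLoop, dif_neg (by omega), if_pos h0]
    · rw [if_neg h0]
      have := getTotalOccurencesLoop_inv d n (d.toNat) 0 0 le_rfl (by omega) (by omega)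
      simp only [sub_zero] at this
      rw [this]
      simp

-- ===== VERDICT (by name: the statement is the Claim_ definition above) =====
theorem getTotalOccurences_spec : Claim_equal_getTotalOccurences := by
  intro d n _
  exact getTotalOccurences_eq d n
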